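-- pv_equiv track=rewrite | github.com/whitem4rk/2023-algorithm-study | LEVEL 3/boxing.py | solution
-- ===== SOURCE A (Python) =====
-- def solution(n, results):
--     answer = 0
--
--     win = {x:set() for x in range(1,n+1)}
--     lose = {x:set() for x in range(1,n+1)}
--
--     for winner, loser in results:
--         win[winner].add(loser)
--         lose[loser].add(winner)
--
--     for i in range(1, n+1):
--         for winner in lose[i]:
--             win[winner].update(win[i])
--
--         for loser in win[i]:
--             lose[loser].update(lose[i])
--
--     for i in range(1, n+1):
--         if len(win[i]) + len(lose[i]) == n - 1:
--             answer += 1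
--
--     return answer
-- ===== SOURCE B (Python) =====
-- def solution(n, results):
--     reach = [[False] * (n + 1) for _ in range(n + 1)]
--     for winner, loser in results:
--         reach[winner][loser] = True
--     for k in range(1, n + 1):
--         for i in range(1, n + 1):
--             if reach[i][k]:
--                 for j in range(1, n + 1):
--                     if reach[k][j]:
--                         reach[i][j] = True
--     answer = 0
--     for i in range(1, n + 1):
--         deg = 0
--         for j in range(1, n + 1):
--             if reach[i][j]:
--                 deg += 1
--             if reach[j][i]:
--                 deg += 1
--         if deg == n - 1:
--             answer += 1
--     return answer
-- ===== Notes on version B (the rewrite author's own statement) =====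
-- stated objective: idiomatic
-- what changed: Replaces A's dict-of-sets single-sweep propagation (win/lose sets updated via set.update) with a boolean n×n reachability matrix closed by the standard Floyd–Warshall triple loop, then a direct degree count per player.
import Mathlib
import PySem

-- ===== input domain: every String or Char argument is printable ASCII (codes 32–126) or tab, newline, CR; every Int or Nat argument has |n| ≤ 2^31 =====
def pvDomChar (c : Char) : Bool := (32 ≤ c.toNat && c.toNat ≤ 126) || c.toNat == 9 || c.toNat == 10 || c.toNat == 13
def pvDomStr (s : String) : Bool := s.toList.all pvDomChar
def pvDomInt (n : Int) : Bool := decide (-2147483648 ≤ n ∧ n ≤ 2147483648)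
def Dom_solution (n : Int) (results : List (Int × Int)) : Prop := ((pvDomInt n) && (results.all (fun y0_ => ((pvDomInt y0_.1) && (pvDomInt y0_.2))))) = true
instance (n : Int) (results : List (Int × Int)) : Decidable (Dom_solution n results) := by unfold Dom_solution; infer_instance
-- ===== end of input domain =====

-- B replaces A's dict-of-sets single-sweep closure with an n×n boolean Floyd–Warshall matrix (alternative algorithm, same result).


-- ===== PORT A =====
-- win[winner].add(loser) / .update(...) on a dict entry: Python raises KeyError on a missing
-- key; ported with Dict.modify (which would insert), exact whenever the key is present — Pre_
-- guarantees every accessed key is a player 1..n, all of which are in the dict.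
-- Set iteration order is not modelled by PySem; A's two inner loops only modify dict entries
-- that are afterwards looked up (each target set receives the same update regardless of
-- visiting order), so the result is order-independent and the fold over the Set's list is exact.

-- for winner, loser in results: win[winner].add(loser); lose[loser].add(winner)
def pvAddPair (wl : PySem.Dict Int (PySem.Set Int) × PySem.Dict Int (PySem.Set Int)) (p : Int × Int) :
    PySem.Dict Int (PySem.Set Int) × PySem.Dict Int (PySem.Set Int) :=
  (wl.1.modify p.1 PySem.Set.empty (fun s => PySem.Set.add s p.2),
   wl.2.modify p.2 PySem.Set.empty (fun s => PySem.Set.add s p.1))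

-- body of A's propagation loop over i:
--   for winner in lose[i]: win[winner].update(win[i])
--   for loser in win[i]: lose[loser].update(lose[i])
def pvPropagate (wl : PySem.Dict Int (PySem.Set Int) × PySem.Dict Int (PySem.Set Int)) (i : Int) :
    PySem.Dict Int (PySem.Set Int) × PySem.Dict Int (PySem.Set Int) :=
  let w' :=
    (wl.2.getD i PySem.Set.empty).foldl
      (fun w winner =>
        w.modify winner PySem.Set.empty (fun s => PySem.Set.update s (w.getD i PySem.Set.empty)))
      wl.1
  let l' :=
    (w'.getD i PySem.Set.empty).foldl
      (fun l loser =>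
        l.modify loser PySem.Set.empty (fun s => PySem.Set.update s (l.getD i PySem.Set.empty)))
      wl.2
  (w', l')

def solution (n : Int) (results : List (Int × Int)) : Int :=
  -- win = {x:set() for x in range(1,n+1)}, lose likewise
  let win0 : PySem.Dict Int (PySem.Set Int) :=
    (PySem.List.pyRange 1 (n + 1) 1).foldl (fun d x => d.insert x PySem.Set.empty) PySem.Dict.empty
  let lose0 : PySem.Dict Int (PySem.Set Int) :=
    (PySem.List.pyRange 1 (n + 1) 1).foldl (fun d x => d.insert x PySem.Set.empty) PySem.Dict.empty
  let wl1 := results.foldl pvAddPair (win0, lose0)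
  let wl2 := (PySem.List.pyRange 1 (n + 1) 1).foldl pvPropagate wl1
  -- for i in range(1, n+1): if len(win[i]) + len(lose[i]) == n - 1: answer += 1
  (PySem.List.pyRange 1 (n + 1) 1).foldl
    (fun answer i =>
      if PySem.Set.len (wl2.1.getD i PySem.Set.empty) + PySem.Set.len (wl2.2.getD i PySem.Set.empty) = n - 1
      then answer + 1 else answer)
    0

-- ===== PORT B =====
-- reach[i][j] read/write; Python raises IndexError out of range (excluded by Pre_); the total
-- forms pyGetD/pySetD are exact on every in-range (incl. negative) index.
def pvCell (m : List (List Bool)) (i j : Int) : Bool :=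
  PySem.List.pyGetD (PySem.List.pyGetD m i []) j false

def pvSetCell (m : List (List Bool)) (i j : Int) : List (List Bool) :=
  PySem.List.pySetD m i (PySem.List.pySetD (PySem.List.pyGetD m i []) j true)

-- for j in range(1, n+1): if reach[k][j]: reach[i][j] = True
def pvFWInner (n : Int) (m : List (List Bool)) (k i : Int) : List (List Bool) :=
  (PySem.List.pyRange 1 (n + 1) 1).foldl (fun m j => if pvCell m k j then pvSetCell m i j else m) m

-- for i in range(1, n+1): if reach[i][k]: <inner loop>
def pvFWMid (n : Int) (m : List (List Bool)) (k : Int) : List (List Bool) :=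
  (PySem.List.pyRange 1 (n + 1) 1).foldl (fun m i => if pvCell m i k then pvFWInner n m k i else m) m

-- deg = transitive wins + transitive losses of player i
def pvDegree (n : Int) (m : List (List Bool)) (i : Int) : Int :=
  (PySem.List.pyRange 1 (n + 1) 1).foldl
    (fun (deg : Int) j =>
      let deg := if pvCell m i j then deg + 1 else deg
      if pvCell m j i then deg + 1 else deg)
    0

def solution_alt (n : Int) (results : List (Int × Int)) : Int :=
  -- reach = [[False]*(n+1) for _ in range(n+1)]
  let reach0 : List (List Bool) :=
    List.replicate (n + 1).toNat (List.replicate (n + 1).toNat false)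
  -- for winner, loser in results: reach[winner][loser] = True
  let reach1 := results.foldl (fun m p => pvSetCell m p.1 p.2) reach0
  -- Floyd–Warshall transitive closure
  let reach2 := (PySem.List.pyRange 1 (n + 1) 1).foldl (pvFWMid n) reach1
  -- count players whose (transitive wins + transitive losses) == n - 1
  (PySem.List.pyRange 1 (n + 1) 1).foldl
    (fun answer i => if pvDegree n reach2 i = n - 1 then answer + 1 else answer)
    0

-- ===== PRECONDITION & SPEC =====
-- Pre_ excludes exactly the inputs on which A raises KeyError: a result pair naming a player
-- outside 1..n (such keys are absent from A's win/lose dicts).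
def Pre_solution (n : Int) (results : List (Int × Int)) : Prop :=
  ∀ p ∈ results, 1 ≤ p.1 ∧ p.1 ≤ n ∧ 1 ≤ p.2 ∧ p.2 ≤ n
instance (n : Int) (results : List (Int × Int)) : Decidable (Pre_solution n results) := by
  unfold Pre_solution; infer_instance
def pvWitness_solution : Int × (List (Int × Int)) := (5, [(4, 3), (4, 2), (3, 2), (1, 2), (2, 5)])

def Spec_solution (n : Int) (results : List (Int × Int)) (out : Int) : Prop := out = solution_alt n results
instance (n : Int) (results : List (Int × Int)) (out : Int) : Decidable (Spec_solution n results out) := by unfold Spec_solution; infer_instance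

-- ===== CLAIM (what is proved, stated in full; the proofs are below) =====
def Claim_equal_solution : Prop := ∀ (n : Int) (results : List (Int × Int)), Dom_solution n results → Pre_solution n results → Spec_solution n results (solution n results)

-- ===== LEMMAS AND PROOFS =====

-- The common abstract object: the edge relation of `results`, closed by one
-- Floyd–Warshall-style step per pivot k ∈ 1..n.
def pvR0 (results : List (Int × Int)) : Int → Int → Bool :=
  fun a b => decide ((a, b) ∈ results)

def pvStep (R : Int → Int → Bool) (k : Int) : Int → Int → Bool :=
  fun a b => R a b || (R a k && R k b)

-- the reference answer both ports are reduced to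
def pvAns (n : Int) (results : List (Int × Int)) : Int :=
  let rng := PySem.List.pyRange 1 (n + 1) 1
  let R := rng.foldl pvStep (pvR0 results)
  (rng.countP (fun i =>
      decide (((rng.countP (fun j => R i j) : Int) + (rng.countP (fun j => R j i) : Int)) = n - 1)) : Int)

lemma pvR0_iff (results : List (Int × Int)) (a b : Int) :
    pvR0 results a b = true ↔ (∃ p ∈ results, p.1 = a ∧ p.2 = b) := by
  simp only [pvR0, decide_eq_true_eq]
  constructor
  · intro h; exact ⟨(a, b), h, rfl, rfl⟩
  · rintro ⟨⟨x, y⟩, h, rfl, rfl⟩; exact h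

lemma pvStep_bounds {R : Int → Int → Bool} {n k : Int}
    (hR : ∀ a b, R a b = true → 1 ≤ a ∧ a ≤ n ∧ 1 ≤ b ∧ b ≤ n) :
    ∀ a b, pvStep R k a b = true → 1 ≤ a ∧ a ≤ n ∧ 1 ≤ b ∧ b ≤ n := by
  intro a b h
  simp only [pvStep, Bool.or_eq_true, Bool.and_eq_true] at h
  rcases h with h | ⟨h1, h2⟩
  · exact hR a b h
  · exact ⟨(hR a k h1).1, (hR a k h1).2.1, (hR k b h2).2.2.1, (hR k b h2).2.2.2⟩

lemma pvFold_bounds {n : Int} :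
    ∀ (ks : List Int) (R : Int → Int → Bool),
      (∀ a b, R a b = true → 1 ≤ a ∧ a ≤ n ∧ 1 ≤ b ∧ b ≤ n) →
      ∀ a b, (ks.foldl pvStep R) a b = true → 1 ≤ a ∧ a ≤ n ∧ 1 ≤ b ∧ b ≤ n
  | [], _, hR => hR
  | _ :: ks, _, hR => pvFold_bounds ks _ (pvStep_bounds hR)

lemma pvAddPair_split :
    ∀ (rs : List (Int × Int)) (w l : PySem.Dict Int (PySem.Set Int)),
      rs.foldl pvAddPair (w, l) =
        (rs.foldl (fun d p => d.modify p.1 PySem.Set.empty (fun s => PySem.Set.add s p.2)) w,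
         rs.foldl (fun d p => d.modify p.2 PySem.Set.empty (fun s => PySem.Set.add s p.1)) l)
  | [], _, _ => rfl
  | _ :: rs, _, _ => pvAddPair_split rs _ _

lemma pvInit_getD :
    ∀ (L : List Int) (d : PySem.Dict Int (PySem.Set Int)),
      (∀ a, d.getD a PySem.Set.empty = PySem.Set.empty) →
      ∀ a, (L.foldl (fun d x => d.insert x PySem.Set.empty) d).getD a PySem.Set.empty = PySem.Set.empty
  | [], _, h => h
  | x :: L, d, h => by
      refine pvInit_getD L _ (fun a => ?_)
      rw [PySem.Dict.getD_insert]
      split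
      · rfl
      · exact h a

lemma pvUpdate_self (s : PySem.Set Int) (xs : List Int) (h : ∀ y ∈ xs, y ∈ s) :
    PySem.Set.update s xs = s := by
  induction xs generalizing s with
  | nil => rfl
  | cons y ys ih =>
      simp only [List.mem_cons, forall_eq_or_imp] at h
      simp only [PySem.Set.update, List.foldl_cons]
      rw [PySem.Set.add_of_mem h.1]
      exact ih _ h.2

lemma pvBuild {γ : Type} (key val : γ → Int) :
    ∀ (rs : List γ) (d : PySem.Dict Int (PySem.Set Int)),
      (∀ a, (d.getD a PySem.Set.empty).Nodup) →
      (∀ a, ((rs.foldl (fun d p => d.modify (key p) PySem.Set.empty (fun s => PySem.Set.add s (val p))) d).getD a PySem.Set.empty).Nodup)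
      ∧ ∀ a b, (b ∈ (rs.foldl (fun d p => d.modify (key p) PySem.Set.empty (fun s => PySem.Set.add s (val p))) d).getD a PySem.Set.empty
          ↔ b ∈ d.getD a PySem.Set.empty ∨ ∃ p ∈ rs, key p = a ∧ val p = b)
  | [], d, h => by
      refine ⟨h, fun a b => ?_⟩
      simp
  | p :: rs, d, h => by
      have hnd : ∀ a, ((d.modify (key p) PySem.Set.empty (fun s => PySem.Set.add s (val p))).getD a PySem.Set.empty).Nodup := by
        intro a
        rw [PySem.Dict.getD_modify]
        split
        · exact PySem.Set.nodup_add _ _ (h _)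
        · exact h a
      obtain ⟨ih1, ih2⟩ := pvBuild key val rs _ hnd
      refine ⟨ih1, fun a b => ?_⟩
      rw [List.foldl_cons, ih2 a b, PySem.Dict.getD_modify]
      by_cases hk : a = key p
      · rw [if_pos hk]
        subst hk
        simp only [PySem.Set.mem_add, List.mem_cons]
        constructor
        · rintro ((h' | h') | ⟨q, hq, hqa, hqb⟩)
          · exact Or.inl h'
          · exact Or.inr ⟨p, Or.inl rfl, rfl, h'.symm⟩
          · exact Or.inr ⟨q, Or.inr hq, hqa, hqb⟩
        · rintro (h' | ⟨q, hq | hq, hqa, hqb⟩)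
          · exact Or.inl (Or.inl h')
          · subst hq; exact Or.inl (Or.inr hqb.symm)
          · exact Or.inr ⟨q, hq, hqa, hqb⟩
      · rw [if_neg hk]
        simp only [List.mem_cons]
        constructor
        · rintro (h' | ⟨q, hq, hqa, hqb⟩)
          · exact Or.inl h'
          · exact Or.inr ⟨q, Or.inr hq, hqa, hqb⟩
        · rintro (h' | ⟨q, hq | hq, hqa, hqb⟩)
          · exact Or.inl h'
          · subst hq; exact absurd hqa.symm hk
          · exact Or.inr ⟨q, hq, hqa, hqb⟩

-- A's two inner propagation loops have the same shape: fold a dict-modify-update over a list.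
lemma pvInner (i : Int) :
    ∀ (L : List Int) (d : PySem.Dict Int (PySem.Set Int)),
      (∀ a, (d.getD a PySem.Set.empty).Nodup) →
      (∀ a, ((L.foldl (fun w x => w.modify x PySem.Set.empty (fun s => PySem.Set.update s (w.getD i PySem.Set.empty))) d).getD a PySem.Set.empty).Nodup)
      ∧ ∀ a b, (b ∈ (L.foldl (fun w x => w.modify x PySem.Set.empty (fun s => PySem.Set.update s (w.getD i PySem.Set.empty))) d).getD a PySem.Set.empty
          ↔ b ∈ d.getD a PySem.Set.empty ∨ (a ∈ L ∧ b ∈ d.getD i PySem.Set.empty))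
  | [], d, h => by
      refine ⟨h, fun a b => ?_⟩
      simp
  | x :: L, d, h => by
      have hgetDi : (d.modify x PySem.Set.empty (fun s => PySem.Set.update s (d.getD i PySem.Set.empty))).getD i PySem.Set.empty = d.getD i PySem.Set.empty := by
        rw [PySem.Dict.getD_modify]
        split
        · next hix =>
            rw [hix, pvUpdate_self _ _ (fun y hy => hy)]
        · rfl
      have hnd : ∀ a, ((d.modify x PySem.Set.empty (fun s => PySem.Set.update s (d.getD i PySem.Set.empty))).getD a PySem.Set.empty).Nodup := by
        intro a
        rw [PySem.Dict.getD_modify]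
        split
        · exact PySem.Set.nodup_update _ _ (h _)
        · exact h a
      obtain ⟨ih1, ih2⟩ := pvInner i L _ hnd
      refine ⟨ih1, fun a b => ?_⟩
      rw [List.foldl_cons, ih2 a b, hgetDi, PySem.Dict.getD_modify]
      by_cases hax : a = x
      · rw [if_pos hax]
        simp only [PySem.Set.mem_update, List.mem_cons]
        subst hax
        constructor
        · rintro ((h' | h') | ⟨hL, hb⟩)
          · exact Or.inl h'
          · exact Or.inr ⟨Or.inl rfl, h'⟩
          · exact Or.inr ⟨Or.inr hL, hb⟩
        · rintro (h' | ⟨_ | hL, hb⟩)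
          · exact Or.inl (Or.inl h')
          · exact Or.inl (Or.inr hb)
          · exact Or.inr ⟨hL, hb⟩
      · rw [if_neg hax]
        simp only [List.mem_cons]
        constructor
        · rintro (h' | ⟨hL, hb⟩)
          · exact Or.inl h'
          · exact Or.inr ⟨Or.inr hL, hb⟩
        · rintro (h' | ⟨hx | hL, hb⟩)
          · exact Or.inl h'
          · exact absurd hx hax
          · exact Or.inr ⟨hL, hb⟩

-- the sweep: folding pvPropagate over pivots = folding pvStep over the same pivots
lemma pvSweep :
    ∀ (ks : List Int) (w l : PySem.Dict Int (PySem.Set Int)) (R : Int → Int → Bool),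
      (∀ a, (w.getD a PySem.Set.empty).Nodup) →
      (∀ a, (l.getD a PySem.Set.empty).Nodup) →
      (∀ a b, b ∈ w.getD a PySem.Set.empty ↔ R a b = true) →
      (∀ a b, a ∈ l.getD b PySem.Set.empty ↔ R a b = true) →
      (∀ a, ((ks.foldl pvPropagate (w, l)).1.getD a PySem.Set.empty).Nodup)
      ∧ (∀ a, ((ks.foldl pvPropagate (w, l)).2.getD a PySem.Set.empty).Nodup)
      ∧ (∀ a b, b ∈ (ks.foldl pvPropagate (w, l)).1.getD a PySem.Set.empty ↔ (ks.foldl pvStep R) a b = true)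
      ∧ (∀ a b, a ∈ (ks.foldl pvPropagate (w, l)).2.getD b PySem.Set.empty ↔ (ks.foldl pvStep R) a b = true)
  | [], w, l, R, hw, hl, hwm, hlm => ⟨hw, hl, hwm, hlm⟩
  | i :: ks, w, l, R, hw, hl, hwm, hlm => by
      rw [List.foldl_cons, List.foldl_cons]
      obtain ⟨hw1, hwm1⟩ := pvInner i (l.getD i PySem.Set.empty) w hw
      set w' := (l.getD i PySem.Set.empty).foldl
        (fun w x => w.modify x PySem.Set.empty (fun s => PySem.Set.update s (w.getD i PySem.Set.empty))) w with hw'def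
      obtain ⟨hl1, hlm1⟩ := pvInner i (w'.getD i PySem.Set.empty) l hl
      set l' := (w'.getD i PySem.Set.empty).foldl
        (fun w x => w.modify x PySem.Set.empty (fun s => PySem.Set.update s (w.getD i PySem.Set.empty))) l with hl'def
      have hprop : pvPropagate (w, l) i = (w', l') := rfl
      rw [hprop]
      have hwmem : ∀ a b, b ∈ w'.getD a PySem.Set.empty ↔ pvStep R i a b = true := by
        intro a b
        rw [hwm1 a b, hwm a b, hlm a i, hwm i b]
        simp only [pvStep, Bool.or_eq_true, Bool.and_eq_true]
      have hwi : ∀ b', b' ∈ w'.getD i PySem.Set.empty ↔ R i b' = true := by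
        intro b'
        rw [hwmem i b']
        simp only [pvStep, Bool.or_eq_true, Bool.and_eq_true]
        tauto
      have hlmem : ∀ a b, a ∈ l'.getD b PySem.Set.empty ↔ pvStep R i a b = true := by
        intro a b
        rw [hlm1 b a, hlm a b, hwi b, hlm a i]
        simp only [pvStep, Bool.or_eq_true, Bool.and_eq_true]
        tauto
      exact pvSweep ks w' l' (pvStep R i) hw1 hl1 hwmem hlmem

-- lengths of a Nodup set with known membership
lemma pvLen_eq_countP (s : List Int) (hs : s.Nodup) (L : List Int) (hL : L.Nodup) (p : Int → Bool)
    (hmem : ∀ b, b ∈ s ↔ (b ∈ L ∧ p b = true)) :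
    s.length = L.countP p := by
  rw [List.countP_eq_length_filter]
  refine List.Perm.length_eq ?_
  rw [List.perm_ext_iff_of_nodup hs (List.Nodup.filter _ hL)]
  intro b
  rw [hmem b, List.mem_filter]

-- ---- B-side matrix lemmas ----

def pvShape (N : Nat) (m : List (List Bool)) : Prop :=
  m.length = N ∧ ∀ row ∈ m, row.length = N

-- index-arithmetic glue for the Int-indexed total primitives
lemma pvPyGetD_toNat {α : Type} (xs : List α) (i : Int) (d : α) (h : 0 ≤ i) :
    PySem.List.pyGetD xs i d = xs.getD i.toNat d := by
  have h2 : ((i.toNat : Nat) : Int) = i := Int.toNat_of_nonneg h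
  rw [← h2, PySem.List.pyGetD_natCast, Int.toNat_natCast]

lemma pvCell_toNat (m : List (List Bool)) (i j : Int) (hi : 0 ≤ i) (hj : 0 ≤ j) :
    pvCell m i j = (m.getD i.toNat []).getD j.toNat false := by
  unfold pvCell
  rw [pvPyGetD_toNat _ _ _ hi, pvPyGetD_toNat _ _ _ hj]

lemma pvSetCell_toNat (m : List (List Bool)) (i j : Int) (hi : 0 ≤ i) (hj : 0 ≤ j) :
    pvSetCell m i j = m.set i.toNat ((m.getD i.toNat []).set j.toNat true) := by
  unfold pvSetCell
  rw [PySem.List.pySetD_of_nonneg _ _ hi, PySem.List.pySetD_of_nonneg _ _ hj,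
    pvPyGetD_toNat _ _ _ hi]

lemma pvGetD_set {α : Type} (xs : List α) (n k : Nat) (v d : α) :
    (xs.set n v).getD k d = if k = n ∧ n < xs.length then v else xs.getD k d := by
  rw [List.getD_eq_getElem?_getD, List.getD_eq_getElem?_getD, List.getElem?_set]
  by_cases h1 : n = k
  · subst h1
    by_cases h2 : n < xs.length
    · rw [if_pos rfl, if_pos h2, if_pos ⟨rfl, h2⟩]
      rfl
    · rw [if_pos rfl, if_neg h2, if_neg (fun h => h2 h.2), List.getElem?_eq_none (by omega)]
  · rw [if_neg h1, if_neg (fun h => h1 h.1.symm)]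

lemma pvGetD_replicate {α : Type} (N : Nat) (x : α) (k : Nat) (d : α) :
    (List.replicate N x).getD k d = if k < N then x else d := by
  rw [List.getD_eq_getElem?_getD, List.getElem?_replicate]
  by_cases h : k < N
  · rw [if_pos h, if_pos h]
    rfl
  · rw [if_neg h, if_neg h]
    rfl

lemma pvCell_replicate (N : Nat) (a b : Int) (ha : 0 ≤ a) (hb : 0 ≤ b) :
    pvCell (List.replicate N (List.replicate N false)) a b = false := by
  rw [pvCell_toNat _ _ _ ha hb, pvGetD_replicate]
  split
  · rw [pvGetD_replicate]
    split <;> rfl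
  · rfl

lemma pvShape_replicate (N : Nat) : pvShape N (List.replicate N (List.replicate N false)) := by
  refine ⟨List.length_replicate, fun row hrow => ?_⟩
  rw [List.eq_of_mem_replicate hrow]
  exact List.length_replicate

lemma pvRowLen {N : Nat} {m : List (List Bool)} (hm : pvShape N m) (k : Nat) (hk : k < N) :
    (m.getD k []).length = N := by
  have hkl : k < m.length := by rw [hm.1]; exact hk
  rw [List.getD_eq_getElem?_getD, List.getElem?_eq_getElem hkl]
  exact hm.2 _ (List.getElem_mem _)

lemma pvSetCell_shape {N : Nat} {m : List (List Bool)} (hm : pvShape N m) (i j : Int)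
    (hi0 : 0 ≤ i) (hiN : i.toNat < N) (hj0 : 0 ≤ j) :
    pvShape N (pvSetCell m i j) := by
  rw [pvSetCell_toNat _ _ _ hi0 hj0]
  constructor
  · rw [List.length_set, hm.1]
  · intro row hrow
    rcases List.mem_or_eq_of_mem_set hrow with h | h
    · exact hm.2 _ h
    · subst h
      rw [List.length_set]
      exact pvRowLen hm _ hiN

lemma pvCell_setCell {N : Nat} {m : List (List Bool)} (hm : pvShape N m) {i j a b : Int}
    (hi0 : 0 ≤ i) (hiN : i.toNat < N) (hj0 : 0 ≤ j) (hjN : j.toNat < N)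
    (ha0 : 0 ≤ a) (hb0 : 0 ≤ b) :
    pvCell (pvSetCell m i j) a b = if a = i ∧ b = j then true else pvCell m a b := by
  rw [pvCell_toNat _ _ _ ha0 hb0, pvCell_toNat _ _ _ ha0 hb0,
    pvSetCell_toNat _ _ _ hi0 hj0, pvGetD_set]
  by_cases hai : a = i
  · subst hai
    rw [if_pos ⟨rfl, by rw [hm.1]; exact hiN⟩, pvGetD_set, pvRowLen hm _ hiN]
    by_cases hbj : b = j
    · subst hbj
      rw [if_pos ⟨rfl, hjN⟩, if_pos ⟨rfl, rfl⟩]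
    · rw [if_neg (fun h => hbj (by omega)), if_neg (fun h => hbj h.2)]
  · rw [if_neg (fun h => hai (by omega : a = i)), if_neg (fun h => hai h.1)]

-- fold of edge insertion
lemma pvBaseMatrix {N : Nat} {n : Int} (hN : N = (n + 1).toNat) :
    ∀ (rs : List (Int × Int)) (m : List (List Bool)),
      pvShape N m →
      (∀ p ∈ rs, 1 ≤ p.1 ∧ p.1 ≤ n ∧ 1 ≤ p.2 ∧ p.2 ≤ n) →
      pvShape N (rs.foldl (fun m p => pvSetCell m p.1 p.2) m)
      ∧ ∀ a b, 1 ≤ a → a ≤ n → 1 ≤ b → b ≤ n →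
          ((pvCell (rs.foldl (fun m p => pvSetCell m p.1 p.2) m) a b = true) ↔ (pvCell m a b = true ∨ (a, b) ∈ rs))
  | [], m, hm, _ => by
      refine ⟨hm, fun a b _ _ _ _ => ?_⟩
      simp
  | ⟨p1, p2⟩ :: rs, m, hm, hrs => by
      have hp := hrs ⟨p1, p2⟩ List.mem_cons_self
      have hp1a : (1 : Int) ≤ p1 := hp.1
      have hp1b : p1 ≤ n := hp.2.1
      have hp2a : (1 : Int) ≤ p2 := hp.2.2.1
      have hp2b : p2 ≤ n := hp.2.2.2
      have hm1 : pvShape N (pvSetCell m p1 p2) :=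
        pvSetCell_shape hm _ _ (by omega) (by omega) (by omega)
      obtain ⟨ih1, ih2⟩ := pvBaseMatrix hN rs (pvSetCell m p1 p2) hm1
        (fun q hq => hrs q (List.mem_cons_of_mem _ hq))
      refine ⟨ih1, fun a b ha1 ha2 hb1 hb2 => ?_⟩
      rw [List.foldl_cons, ih2 a b ha1 ha2 hb1 hb2,
        pvCell_setCell hm (by omega) (by omega) (by omega) (by omega) (by omega) (by omega)]
      constructor
      · rintro (h' | h')
        · by_cases hab : a = p1 ∧ b = p2
          · exact Or.inr (List.mem_cons.2 (Or.inl (by rw [hab.1, hab.2])))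
          · rw [if_neg hab] at h'
            exact Or.inl h'
        · exact Or.inr (List.mem_cons_of_mem _ h')
      · rintro (h' | h')
        · split
          · exact Or.inl rfl
          · exact Or.inl h'
        · rcases List.mem_cons.1 h' with h' | h'
          · simp only [Prod.mk.injEq] at h'
            exact Or.inl (by rw [if_pos h'])
          · exact Or.inr h'

lemma pvFWj {N : Nat} {n : Int} (hN : N = (n + 1).toNat) (R : Int → Int → Bool) (k i : Int)
    (hk : 1 ≤ k ∧ k ≤ n) (hi : 1 ≤ i ∧ i ≤ n) :
    ∀ (J : List Int) (Q : Int → Int → Prop) (m : List (List Bool)),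
      pvShape N m →
      (∀ j ∈ J, 1 ≤ j ∧ j ≤ n) →
      (∀ a b, 1 ≤ a → a ≤ n → 1 ≤ b → b ≤ n → ((pvCell m a b = true) ↔ Q a b)) →
      (∀ b, 1 ≤ b → b ≤ n → (Q k b ↔ R k b = true)) →
      pvShape N (J.foldl (fun m j => if pvCell m k j then pvSetCell m i j else m) m)
      ∧ ∀ a b, 1 ≤ a → a ≤ n → 1 ≤ b → b ≤ n →
          ((pvCell (J.foldl (fun m j => if pvCell m k j then pvSetCell m i j else m) m) a b = true)
            ↔ Q a b ∨ (a = i ∧ b ∈ J ∧ R k b = true))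
  | [], Q, m, hm, _, hQ, _ => by
      refine ⟨hm, fun a b ha1 ha2 hb1 hb2 => ?_⟩
      simp [hQ a b ha1 ha2 hb1 hb2]
  | j :: J, Q, m, hm, hJ, hQ, hrow => by
      have hj := hJ j List.mem_cons_self
      have hguard : (pvCell m k j = true) ↔ (R k j = true) := by
        rw [hQ k j hk.1 hk.2 hj.1 hj.2]
        exact hrow j hj.1 hj.2
      rw [List.foldl_cons]
      by_cases hkj : R k j = true
      · rw [if_pos (hguard.2 hkj)]
        have hm1 : pvShape N (pvSetCell m i j) :=
          pvSetCell_shape hm _ _ (by omega) (by omega) (by omega)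
        have hQ1 : ∀ a b, 1 ≤ a → a ≤ n → 1 ≤ b → b ≤ n →
            ((pvCell (pvSetCell m i j) a b = true) ↔ ((a = i ∧ b = j) ∨ Q a b)) := by
          intro a b ha1 ha2 hb1 hb2
          rw [pvCell_setCell hm (by omega) (by omega) (by omega) (by omega) (by omega) (by omega)]
          split
          · next h => simp [h]
          · next h => simp [h, hQ a b ha1 ha2 hb1 hb2]
        have hrow1 : ∀ b, 1 ≤ b → b ≤ n → (((k = i ∧ b = j) ∨ Q k b) ↔ R k b = true) := by
          intro b hb1 hb2
          constructor
          · rintro (⟨_, rfl⟩ | hq)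
            · exact hkj
            · exact (hrow b hb1 hb2).1 hq
          · intro h; exact Or.inr ((hrow b hb1 hb2).2 h)
        obtain ⟨sh, hmem⟩ := pvFWj hN R k i hk hi J (fun a b => (a = i ∧ b = j) ∨ Q a b)
          (pvSetCell m i j) hm1 (fun q hq => hJ q (List.mem_cons_of_mem _ hq)) hQ1 hrow1
        refine ⟨sh, fun a b ha1 ha2 hb1 hb2 => ?_⟩
        rw [hmem a b ha1 ha2 hb1 hb2]
        simp only [List.mem_cons]
        constructor
        · rintro ((⟨rfl, rfl⟩ | hq) | ⟨rfl, hbJ, hRb⟩)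
          · exact Or.inr ⟨rfl, Or.inl rfl, hkj⟩
          · exact Or.inl hq
          · exact Or.inr ⟨rfl, Or.inr hbJ, hRb⟩
        · rintro (hq | ⟨rfl, hb | hbJ, hRb⟩)
          · exact Or.inl (Or.inr hq)
          · exact Or.inl (Or.inl ⟨rfl, hb⟩)
          · exact Or.inr ⟨rfl, hbJ, hRb⟩
      · rw [if_neg (fun h => hkj (hguard.1 h))]
        obtain ⟨sh, hmem⟩ := pvFWj hN R k i hk hi J Q m hm
          (fun q hq => hJ q (List.mem_cons_of_mem _ hq)) hQ hrow
        refine ⟨sh, fun a b ha1 ha2 hb1 hb2 => ?_⟩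
        rw [hmem a b ha1 ha2 hb1 hb2]
        simp only [List.mem_cons]
        constructor
        · rintro (hq | ⟨rfl, hbJ, hRb⟩)
          · exact Or.inl hq
          · exact Or.inr ⟨rfl, Or.inr hbJ, hRb⟩
        · rintro (hq | ⟨rfl, hb | hbJ, hRb⟩)
          · exact Or.inl hq
          · subst hb; exact absurd hRb hkj
          · exact Or.inr ⟨rfl, hbJ, hRb⟩

lemma pvFWi {N : Nat} {n : Int} (hN : N = (n + 1).toNat) (R : Int → Int → Bool) (k : Int)
    (hk : 1 ≤ k ∧ k ≤ n)
    (hbnd : ∀ a b, R a b = true → 1 ≤ a ∧ a ≤ n ∧ 1 ≤ b ∧ b ≤ n) :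
    ∀ (I : List Int) (P : Int → Prop) (m : List (List Bool)),
      pvShape N m →
      (∀ i ∈ I, 1 ≤ i ∧ i ≤ n) →
      (∀ a b, 1 ≤ a → a ≤ n → 1 ≤ b → b ≤ n →
        ((pvCell m a b = true) ↔ (R a b = true ∨ (P a ∧ R a k = true ∧ R k b = true)))) →
      pvShape N (I.foldl (fun m i => if pvCell m i k then pvFWInner n m k i else m) m)
      ∧ ∀ a b, 1 ≤ a → a ≤ n → 1 ≤ b → b ≤ n →
          ((pvCell (I.foldl (fun m i => if pvCell m i k then pvFWInner n m k i else m) m) a b = true)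
            ↔ (R a b = true ∨ ((P a ∨ a ∈ I) ∧ R a k = true ∧ R k b = true)))
  | [], P, m, hm, _, hc => by
      refine ⟨hm, fun a b ha1 ha2 hb1 hb2 => ?_⟩
      rw [List.foldl_nil, hc a b ha1 ha2 hb1 hb2]
      simp
  | i :: I, P, m, hm, hI, hc => by
      have hi := hI i List.mem_cons_self
      have hguard : (pvCell m i k = true) ↔ (R i k = true) := by
        rw [hc i k hi.1 hi.2 hk.1 hk.2]
        constructor
        · rintro (h | ⟨_, h, _⟩) <;> exact h
        · exact Or.inl
      rw [List.foldl_cons]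
      by_cases hik : R i k = true
      · rw [if_pos (hguard.2 hik)]
        have hrow : ∀ b, 1 ≤ b → b ≤ n →
            ((R k b = true ∨ (P k ∧ R k k = true ∧ R k b = true)) ↔ R k b = true) := by
          intro b _ _
          constructor
          · rintro (h | ⟨_, _, h⟩) <;> exact h
          · exact Or.inl
        obtain ⟨sh1, hmem1⟩ := pvFWj hN R k i hk hi (PySem.List.pyRange 1 (n + 1) 1)
          (fun a b => R a b = true ∨ (P a ∧ R a k = true ∧ R k b = true)) m hm
          (fun j hj => by rw [PySem.List.mem_pyRange_one] at hj; omega)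
          hc hrow
        rw [show pvFWInner n m k i =
            (PySem.List.pyRange 1 (n + 1) 1).foldl (fun m j => if pvCell m k j then pvSetCell m i j else m) m from rfl]
        have hc1 : ∀ a b, 1 ≤ a → a ≤ n → 1 ≤ b → b ≤ n →
            ((pvCell ((PySem.List.pyRange 1 (n + 1) 1).foldl (fun m j => if pvCell m k j then pvSetCell m i j else m) m) a b = true)
              ↔ (R a b = true ∨ ((P a ∨ a = i) ∧ R a k = true ∧ R k b = true))) := by
          intro a b ha1 ha2 hb1 hb2
          rw [hmem1 a b ha1 ha2 hb1 hb2]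
          constructor
          · rintro ((h | ⟨hP, h1, h2⟩) | ⟨rfl, _, hRb⟩)
            · exact Or.inl h
            · exact Or.inr ⟨Or.inl hP, h1, h2⟩
            · exact Or.inr ⟨Or.inr rfl, hik, hRb⟩
          · rintro (h | ⟨hP | rfl, h1, h2⟩)
            · exact Or.inl (Or.inl h)
            · exact Or.inl (Or.inr ⟨hP, h1, h2⟩)
            · refine Or.inr ⟨rfl, ?_, h2⟩
              rw [PySem.List.mem_pyRange_one]
              have := hbnd k b h2
              omega
        obtain ⟨sh2, hmem2⟩ := pvFWi hN R k hk hbnd I (fun a => P a ∨ a = i) _ sh1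
          (fun q hq => hI q (List.mem_cons_of_mem _ hq)) hc1
        refine ⟨sh2, fun a b ha1 ha2 hb1 hb2 => ?_⟩
        rw [hmem2 a b ha1 ha2 hb1 hb2]
        simp only [List.mem_cons]
        tauto
      · rw [if_neg (fun h => hik (hguard.1 h))]
        obtain ⟨sh2, hmem2⟩ := pvFWi hN R k hk hbnd I P m hm
          (fun q hq => hI q (List.mem_cons_of_mem _ hq)) hc
        refine ⟨sh2, fun a b ha1 ha2 hb1 hb2 => ?_⟩
        rw [hmem2 a b ha1 ha2 hb1 hb2]
        simp only [List.mem_cons]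
        constructor
        · rintro (h | ⟨hP | hI', h1, h2⟩)
          · exact Or.inl h
          · exact Or.inr ⟨Or.inl hP, h1, h2⟩
          · exact Or.inr ⟨Or.inr (Or.inr hI'), h1, h2⟩
        · rintro (h | ⟨hP | rfl | hI', h1, h2⟩)
          · exact Or.inl h
          · exact Or.inr ⟨Or.inl hP, h1, h2⟩
          · exact absurd h1 hik
          · exact Or.inr ⟨Or.inr hI', h1, h2⟩

lemma pvFWk {N : Nat} {n : Int} (hN : N = (n + 1).toNat) :
    ∀ (ks : List Int) (m : List (List Bool)) (R : Int → Int → Bool),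
      pvShape N m →
      (∀ k ∈ ks, 1 ≤ k ∧ k ≤ n) →
      (∀ a b, R a b = true → 1 ≤ a ∧ a ≤ n ∧ 1 ≤ b ∧ b ≤ n) →
      (∀ a b, 1 ≤ a → a ≤ n → 1 ≤ b → b ≤ n → ((pvCell m a b = true) ↔ R a b = true)) →
      ∀ a b, 1 ≤ a → a ≤ n → 1 ≤ b → b ≤ n →
        ((pvCell (ks.foldl (pvFWMid n) m) a b = true) ↔ (ks.foldl pvStep R) a b = true)
  | [], m, R, _, _, _, hc => by
      intro a b ha1 ha2 hb1 hb2
      exact hc a b ha1 ha2 hb1 hb2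
  | k :: ks, m, R, hm, hks, hbnd, hc => by
      have hk := hks k List.mem_cons_self
      rw [List.foldl_cons, List.foldl_cons]
      have hc0 : ∀ a b, 1 ≤ a → a ≤ n → 1 ≤ b → b ≤ n →
          ((pvCell m a b = true) ↔ (R a b = true ∨ ((fun _ => False) a ∧ R a k = true ∧ R k b = true))) := by
        intro a b ha1 ha2 hb1 hb2
        rw [hc a b ha1 ha2 hb1 hb2]
        simp
      obtain ⟨sh, hmem⟩ := pvFWi hN R k hk hbnd (PySem.List.pyRange 1 (n + 1) 1) (fun _ => False) m hm
        (fun q hq => by rw [PySem.List.mem_pyRange_one] at hq; omega) hc0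
      have hc1 : ∀ a b, 1 ≤ a → a ≤ n → 1 ≤ b → b ≤ n →
          ((pvCell (pvFWMid n m k) a b = true) ↔ pvStep R k a b = true) := by
        intro a b ha1 ha2 hb1 hb2
        rw [show pvFWMid n m k =
          (PySem.List.pyRange 1 (n + 1) 1).foldl (fun m i => if pvCell m i k then pvFWInner n m k i else m) m from rfl]
        rw [hmem a b ha1 ha2 hb1 hb2]
        simp only [pvStep, Bool.or_eq_true, Bool.and_eq_true, false_or]
        constructor
        · rintro (h | ⟨_, h1, h2⟩)
          · exact Or.inl h
          · exact Or.inr ⟨h1, h2⟩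
        · rintro (h | ⟨h1, h2⟩)
          · exact Or.inl h
          · refine Or.inr ⟨?_, h1, h2⟩
            rw [PySem.List.mem_pyRange_one]
            omega
      have shMid : pvShape N (pvFWMid n m k) := by
        rw [show pvFWMid n m k =
          (PySem.List.pyRange 1 (n + 1) 1).foldl (fun m i => if pvCell m i k then pvFWInner n m k i else m) m from rfl]
        exact sh
      exact pvFWk hN ks (pvFWMid n m k) (pvStep R k) shMid
        (fun q hq => hks q (List.mem_cons_of_mem _ hq)) (pvStep_bounds hbnd) hc1

lemma pvTwoCount (c1 c2 : Int → Bool) :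
    ∀ (L : List Int) (acc : Int),
      L.foldl (fun (deg : Int) j =>
        if c2 j then (if c1 j then deg + 1 else deg) + 1 else (if c1 j then deg + 1 else deg)) acc
        = acc + (L.countP c1 : Int) + (L.countP c2 : Int)
  | [], acc => by simp
  | j :: L, acc => by
      rw [List.foldl_cons, pvTwoCount c1 c2 L _, List.countP_cons, List.countP_cons]
      split_ifs <;> simp_all <;> omega

lemma pvDegree_eq (n : Int) (m : List (List Bool)) (i : Int) :
    pvDegree n m i =
      ((PySem.List.pyRange 1 (n + 1) 1).countP (fun j => pvCell m i j) : Int)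
      + ((PySem.List.pyRange 1 (n + 1) 1).countP (fun j => pvCell m j i) : Int) := by
  unfold pvDegree
  dsimp only
  rw [pvTwoCount]
  simp only [zero_add]

lemma pvA_eq (n : Int) (results : List (Int × Int)) (hPre : Pre_solution n results) :
    solution n results = pvAns n results := by
  unfold solution
  dsimp only
  rw [pvAddPair_split]
  set rng := PySem.List.pyRange 1 (n + 1) 1 with hrng
  set D0 := rng.foldl (fun d x => d.insert x PySem.Set.empty) PySem.Dict.empty with hD0
  set W1 := results.foldl (fun d p => d.modify p.1 PySem.Set.empty (fun s => PySem.Set.add s p.2)) D0 with hW1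
  set L1 := results.foldl (fun d p => d.modify p.2 PySem.Set.empty (fun s => PySem.Set.add s p.1)) D0 with hL1
  set R := rng.foldl pvStep (pvR0 results) with hR
  have hEmpty : ∀ a : Int, D0.getD a PySem.Set.empty = PySem.Set.empty := by
    intro a
    rw [hD0]
    exact pvInit_getD rng PySem.Dict.empty (fun a => PySem.Dict.getD_empty ..) a
  have hNodup0 : ∀ a : Int, (D0.getD a PySem.Set.empty).Nodup := by
    intro a
    rw [hEmpty a]
    exact List.nodup_nil
  have hBW := pvBuild (fun p : Int × Int => p.1) (fun p : Int × Int => p.2) results D0 hNodup0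
  dsimp only at hBW
  rw [← hW1] at hBW
  obtain ⟨hwN, hwM⟩ := hBW
  have hBL := pvBuild (fun p : Int × Int => p.2) (fun p : Int × Int => p.1) results D0 hNodup0
  dsimp only at hBL
  rw [← hL1] at hBL
  obtain ⟨hlN, hlM⟩ := hBL
  have hwM' : ∀ a b : Int, b ∈ W1.getD a PySem.Set.empty ↔ pvR0 results a b = true := by
    intro a b
    rw [hwM a b, hEmpty a, pvR0_iff]
    simp only [PySem.Set.empty, List.not_mem_nil, false_or]
  have hlM' : ∀ a b : Int, a ∈ L1.getD b PySem.Set.empty ↔ pvR0 results a b = true := by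
    intro a b
    rw [hlM b a, hEmpty b, pvR0_iff]
    simp only [PySem.Set.empty, List.not_mem_nil, false_or]
    constructor <;> (rintro ⟨q, hq, h1, h2⟩; exact ⟨q, hq, h2, h1⟩)
  obtain ⟨hW2n, hL2n, hW2, hL2⟩ := pvSweep rng W1 L1 (pvR0 results) hwN hlN hwM' hlM'
  rw [← hR] at hW2 hL2
  have hbnd : ∀ a b : Int, R a b = true → 1 ≤ a ∧ a ≤ n ∧ 1 ≤ b ∧ b ≤ n := by
    rw [hR]
    refine pvFold_bounds _ _ (fun a b h => ?_)
    rw [pvR0_iff] at h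
    obtain ⟨p, hp, h1, h2⟩ := h
    have := hPre p hp
    omega
  rw [PySem.List.foldl_ite_add_one]
  unfold pvAns
  dsimp only
  rw [zero_add, ← hrng, ← hR]
  refine congrArg _ (List.countP_congr fun i hi => ?_)
  rw [hrng, PySem.List.mem_pyRange_one] at hi
  have hWlen : PySem.Set.len ((rng.foldl pvPropagate (W1, L1)).1.getD i PySem.Set.empty)
      = ((rng.countP (fun j => R i j) : Int)) := by
    have h := pvLen_eq_countP ((rng.foldl pvPropagate (W1, L1)).1.getD i PySem.Set.empty)
      (hW2n i) rng (by rw [hrng]; exact PySem.List.nodup_pyRange_one _ _) (fun j => R i j)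
      (fun b => by
        rw [hW2 i b]
        constructor
        · intro hRb
          refine ⟨?_, hRb⟩
          have hb := hbnd i b hRb
          rw [hrng, PySem.List.mem_pyRange_one]
          omega
        · exact fun h => h.2)
    simp only [PySem.Set.len]
    omega
  have hLlen : PySem.Set.len ((rng.foldl pvPropagate (W1, L1)).2.getD i PySem.Set.empty)
      = ((rng.countP (fun j => R j i) : Int)) := by
    have h := pvLen_eq_countP ((rng.foldl pvPropagate (W1, L1)).2.getD i PySem.Set.empty)
      (hL2n i) rng (by rw [hrng]; exact PySem.List.nodup_pyRange_one _ _) (fun j => R j i)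
      (fun a => by
        rw [hL2 a i]
        constructor
        · intro hRb
          refine ⟨?_, hRb⟩
          have hb := hbnd a i hRb
          rw [hrng, PySem.List.mem_pyRange_one]
          omega
        · exact fun h => h.2)
    simp only [PySem.Set.len]
    omega
  rw [hWlen, hLlen]

lemma pvB_eq (n : Int) (results : List (Int × Int)) (hPre : Pre_solution n results) :
    solution_alt n results = pvAns n results := by
  unfold solution_alt
  dsimp only
  set rng := PySem.List.pyRange 1 (n + 1) 1 with hrng
  set M0 := List.replicate (n + 1).toNat (List.replicate (n + 1).toNat false) with hM0
  set M1 := results.foldl (fun m p => pvSetCell m p.1 p.2) M0 with hM1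
  set M2 := rng.foldl (pvFWMid n) M1 with hM2
  set R := rng.foldl pvStep (pvR0 results) with hR
  have hsh0 : pvShape (n + 1).toNat M0 := by
    rw [hM0]; exact pvShape_replicate _
  have hB := pvBaseMatrix rfl results M0 hsh0 hPre
  rw [← hM1] at hB
  obtain ⟨hsh1, hc1⟩ := hB
  have hc1' : ∀ a b : Int, 1 ≤ a → a ≤ n → 1 ≤ b → b ≤ n →
      ((pvCell M1 a b = true) ↔ pvR0 results a b = true) := by
    intro a b ha1 ha2 hb1 hb2
    rw [hc1 a b ha1 ha2 hb1 hb2, hM0, pvCell_replicate _ _ _ (by omega) (by omega), pvR0_iff]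
    constructor
    · rintro (h | h)
      · exact absurd h (by simp)
      · exact ⟨(a, b), h, rfl, rfl⟩
    · rintro ⟨⟨x, y⟩, h, rfl, rfl⟩
      exact Or.inr h
  have hbnd : ∀ a b : Int, pvR0 results a b = true → 1 ≤ a ∧ a ≤ n ∧ 1 ≤ b ∧ b ≤ n := by
    intro a b h
    rw [pvR0_iff] at h
    obtain ⟨p, hp, h1, h2⟩ := h
    have := hPre p hp
    omega
  have hc2 := pvFWk rfl rng M1 (pvR0 results) hsh1
    (fun q hq => by rw [hrng, PySem.List.mem_pyRange_one] at hq; omega) hbnd hc1'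
  rw [← hM2, ← hR] at hc2
  rw [PySem.List.foldl_ite_add_one]
  unfold pvAns
  dsimp only
  rw [zero_add, ← hrng, ← hR]
  refine congrArg _ (List.countP_congr fun i hi => ?_)
  rw [hrng, PySem.List.mem_pyRange_one] at hi
  rw [pvDegree_eq]
  have hcnt1 : (rng.countP fun j => pvCell M2 i j) = (rng.countP fun j => R i j) := by
    refine List.countP_congr fun j hj => ?_
    rw [hrng, PySem.List.mem_pyRange_one] at hj
    exact hc2 i j (by omega) (by omega) (by omega) (by omega)
  have hcnt2 : (rng.countP fun j => pvCell M2 j i) = (rng.countP fun j => R j i) := by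
    refine List.countP_congr fun j hj => ?_
    rw [hrng, PySem.List.mem_pyRange_one] at hj
    exact hc2 j i (by omega) (by omega) (by omega) (by omega)
  rw [hcnt1, hcnt2]

-- ===== VERDICT (by name: the statement is the Claim_ definition above) =====
theorem solution_spec : Claim_equal_solution := by
  intro n results _hDom hPre
  unfold Spec_solution
  rw [pvA_eq n results hPre, pvB_eq n results hPre]
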